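-- pv_equiv track=rewrite | github.com/anil8358/work | rssfeed/TitleFetcher.py | getLinkTitle
-- ===== SOURCE A (Python) =====
-- def removeExtraCharacter(string):
--     ret = string[0:len(string) - 2]
--     return ret
--
-- def reverse(text):
--     rev = ''
--     cnt = 0
--     for i in range(len(text), -1, -1):
--             rev += text[i-1]
--     return rev
--
-- def getLinkTitle(link):
--     str = ""
--     cnt = 0
--     for c in reversed(link):
--         if c == '/':
--             cnt = cnt + 1
--         if cnt == 1:
--             if c == '-' or c == '/':
--                 str = str + ' '
--             else:
--                 str = str + c
--     return removeExtraCharacter(reverse(str))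
-- ===== SOURCE B (Python) =====
-- def getLinkTitle(link):
--     parts = link.split('/')
--     return parts[-2].replace('-', ' ')
-- ===== Notes on version B (the rewrite author's own statement) =====
-- stated objective: simpler
-- what changed: B replaces A's reversed char-by-char scan with a slash counter plus manual reverse-and-trim helpers by a single split('/'), indexing the second-to-last segment and one str.replace.
import Mathlib
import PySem

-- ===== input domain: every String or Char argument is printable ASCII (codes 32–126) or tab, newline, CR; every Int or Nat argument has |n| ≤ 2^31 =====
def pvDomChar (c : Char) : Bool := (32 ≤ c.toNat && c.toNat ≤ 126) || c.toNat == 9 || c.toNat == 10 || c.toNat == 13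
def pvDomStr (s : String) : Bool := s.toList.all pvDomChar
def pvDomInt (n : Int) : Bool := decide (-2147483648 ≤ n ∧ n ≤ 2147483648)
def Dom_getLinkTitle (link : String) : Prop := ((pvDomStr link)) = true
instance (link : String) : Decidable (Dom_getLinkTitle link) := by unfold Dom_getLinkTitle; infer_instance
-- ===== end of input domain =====

-- B replaces A's reversed scan-with-slash-counter plus manual reverse/trim helpers by a
-- single split('/') + indexing of the second-to-last segment (objective: simpler).

-- ===== PORT A =====
-- helper removeExtraCharacter: string[0:len(string)-2]
def pvRemoveExtraCharacter (s : List Char) : List Char :=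
  PySem.List.slice s (some 0) (some ((s.length : Int) - 2))

-- helper reverse: rev += text[i-1] for i in range(len(text), -1, -1); Python raises
-- IndexError only for text = "" (unreachable under Pre_); `.toList` keeps the port total.
def pvReverse (text : List Char) : List Char :=
  (PySem.List.pyRange (text.length : Int) (-1) (-1)).foldl
    (fun rev i => rev ++ (PySem.List.pyGet? text (i - 1)).toList) []

-- loop body of getLinkTitle: state (str, cnt), Python's update order kept
def pvStepA (st : List Char × Nat) (c : Char) : List Char × Nat :=
  let cnt := if c = '/' then st.2 + 1 else st.2
  let s := if cnt = 1 then (if c = '-' ∨ c = '/' then st.1 ++ [' '] else st.1 ++ [c]) else st.1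
  (s, cnt)

def getLinkTitle (link : String) : String :=
  let p := link.toList.reverse.foldl pvStepA ([], 0)
  String.mk (pvRemoveExtraCharacter (pvReverse p.1))

-- ===== PORT B =====
def getLinkTitle_alt (link : String) : String :=
  let parts := PySem.Chars.splitOn link.toList ['/']
  match PySem.List.pyGet? parts (-2) with
  | some p => String.mk (PySem.Chars.replace p ['-'] [' '])
  | none => ""   -- parts[-2] raises IndexError in Python (no '/'); excluded by Pre_

-- ===== PRECONDITION & SPEC =====
-- Pre_ excludes exactly the inputs with no '/', on which A raises IndexError (B raises too).
def Pre_getLinkTitle (link : String) : Prop := '/' ∈ link.toList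
instance (link : String) : Decidable (Pre_getLinkTitle link) := by unfold Pre_getLinkTitle; infer_instance

def pvWitness_getLinkTitle : String := "https://example.com/some-nice-title/42"

def Spec_getLinkTitle (link : String) (out : String) : Prop := out = getLinkTitle_alt link
instance (link : String) (out : String) : Decidable (Spec_getLinkTitle link out) := by unfold Spec_getLinkTitle; infer_instance

-- ===== CLAIM (what is proved, stated in full; the proofs are below) =====
def Claim_equal_getLinkTitle : Prop := ∀ (link : String), Dom_getLinkTitle link → Pre_getLinkTitle link → Spec_getLinkTitle link (getLinkTitle link)

-- ===== LEMMAS AND PROOFS =====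

-- the character map '-' ↦ ' '
def pvF (c : Char) : Char := if c = '-' then ' ' else c

-- reference splitter: split on '/' with segment-in-progress `pre`
def pvSplit (pre : List Char) : List Char → List (List Char)
  | [] => [pre]
  | c :: t => if c = '/' then pre :: pvSplit [] t else pvSplit (pre ++ [c]) t

theorem pvSplit_ne_nil (l pre : List Char) : pvSplit pre l ≠ [] := by
  induction l generalizing pre with
  | nil => simp [pvSplit]
  | cons c t ih => by_cases h : c = '/' <;> simp [pvSplit, h, ih]

theorem pvSplit_no_slash (l : List Char) (pre : List Char) (h : '/' ∉ l) :
    pvSplit pre l = [pre ++ l] := by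
  induction l generalizing pre with
  | nil => simp [pvSplit]
  | cons c t ih =>
    have hc : c ≠ '/' := by rintro rfl; exact h (List.mem_cons_self)
    have ht : '/' ∉ t := fun hm => h (List.mem_cons_of_mem _ hm)
    simp [pvSplit, hc, ih _ ht]

theorem pvSplit_append (x : List Char) (pre y : List Char) :
    pvSplit pre (x ++ '/' :: y) = pvSplit pre x ++ pvSplit [] y := by
  induction x generalizing pre with
  | nil => simp [pvSplit]
  | cons c t ih => by_cases h : c = '/' <;> simp [pvSplit, h, ih]

theorem pvSplit_getLast? (l : List Char) (pre : List Char) (hpre : '/' ∉ pre) :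
    (pvSplit pre l).getLast? =
      some (((pre ++ l).reverse.takeWhile (fun c => c != '/')).reverse) := by
  induction l generalizing pre with
  | nil =>
    have : (pre.reverse.takeWhile (fun c => c != '/')) = pre.reverse := by
      rw [List.takeWhile_eq_self_iff]
      intro x hx
      simp only [bne_iff_ne, ne_eq]
      rintro rfl; exact hpre (List.mem_reverse.mp hx)
    simp [pvSplit, this]
  | cons c t ih =>
    by_cases h : c = '/'
    · subst h
      have hne := pvSplit_ne_nil t ([] : List Char)
      have step : (pvSplit pre ('/' :: t)).getLast? = (pvSplit [] t).getLast? := by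
        have : pvSplit pre ('/' :: t) = [pre] ++ pvSplit [] t := by simp [pvSplit]
        rw [this, List.getLast?_append_of_ne_nil [pre] hne]
      rw [step, ih [] (by simp)]
      congr 1
      have hrev : (pre ++ '/' :: t).reverse = t.reverse ++ '/' :: pre.reverse := by
        simp
      rw [hrev, List.takeWhile_append]
      have hslash : (( '/' :: pre.reverse).takeWhile (fun c => c != '/')) = [] := by
        simp [List.takeWhile]
      split_ifs with hlen
      · have : t.reverse.takeWhile (fun c => c != '/') = t.reverse :=
          (List.takeWhile_prefix _).eq_of_length hlen
        simp [hslash, this]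
      · simp
    · have : pvSplit pre (c :: t) = pvSplit (pre ++ [c]) t := by simp [pvSplit, h]
      rw [this, ih (pre ++ [c]) (by simp [hpre]; exact fun hh => h hh.symm)]
      simp

-- the fuel-based splitOn.go computes pvSplit when given enough fuel
theorem pvGo_eq (fuel : Nat) : ∀ (l cur acc : _), l.length ≤ fuel →
    PySem.Chars.splitOn.go ['/'] fuel l cur acc = acc.reverse ++ pvSplit cur.reverse l := by
  induction fuel with
  | zero =>
    intro l cur acc h
    have : l = [] := List.length_eq_zero_iff.mp (Nat.le_zero.mp h)
    subst this
    simp [PySem.Chars.splitOn.go, pvSplit]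
  | succ fuel ih =>
    intro l cur acc h
    cases l with
    | nil => simp [PySem.Chars.splitOn.go, pvSplit]
    | cons c rest =>
      have hlen : rest.length ≤ fuel := by simpa using h
      by_cases hc : c = '/'
      · subst hc
        have hpre : (['/'] : List Char).isPrefixOf ('/' :: rest) = true := by
          simp [List.isPrefixOf]
        simp only [PySem.Chars.splitOn.go, hpre, if_pos, List.length_cons, List.length_nil,
          List.drop_succ_cons, List.drop_zero]
        rw [ih rest [] _ hlen]
        simp [pvSplit]
      · have hpre : (['/'] : List Char).isPrefixOf (c :: rest) = false := by
          simp [List.isPrefixOf]; exact fun hh => absurd hh.symm hc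
        simp only [PySem.Chars.splitOn.go, hpre]
        rw [if_neg (by simp)]
        rw [ih rest (c :: cur) acc hlen]
        simp [pvSplit, hc]

theorem pvSplitOn_eq (cs : List Char) :
    PySem.Chars.splitOn cs ['/'] = pvSplit [] cs := by
  unfold PySem.Chars.splitOn
  rw [pvGo_eq (cs.length + 1) cs [] [] (Nat.le_succ _)]
  simp

-- replace with one-character old/new is a map
theorem pvReplaceGo_eq (fuel : Nat) : ∀ (l acc : List Char), l.length ≤ fuel →
    PySem.Chars.replace.go ['-'] [' '] fuel l acc = acc.reverse ++ l.map pvF := by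
  induction fuel with
  | zero =>
    intro l acc h
    have : l = [] := List.length_eq_zero_iff.mp (Nat.le_zero.mp h)
    subst this
    simp [PySem.Chars.replace.go]
  | succ fuel ih =>
    intro l acc h
    cases l with
    | nil => simp [PySem.Chars.replace.go]
    | cons c rest =>
      have hlen : rest.length ≤ fuel := by simpa using h
      by_cases hc : c = '-'
      · subst hc
        have hpre : (['-'] : List Char).isPrefixOf ('-' :: rest) = true := by
          simp [List.isPrefixOf]
        simp only [PySem.Chars.replace.go, hpre, if_pos, List.length_cons, List.length_nil,
          List.drop_succ_cons, List.drop_zero]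
        rw [ih rest _ hlen]
        simp [pvF]
      · have hpre : (['-'] : List Char).isPrefixOf (c :: rest) = false := by
          simp [List.isPrefixOf]; exact fun hh => absurd hh.symm hc
        simp only [PySem.Chars.replace.go, hpre]
        rw [if_neg (by simp)]
        rw [ih rest (c :: acc) hlen]
        simp [pvF, hc]

theorem pvReplace_eq (l : List Char) :
    PySem.Chars.replace l ['-'] [' '] = l.map pvF := by
  unfold PySem.Chars.replace
  rw [if_neg (by simp)]
  rw [pvReplaceGo_eq l.length l [] le_rfl]
  simp

-- A's fold: before the first slash nothing is collected
theorem pvFoldA_zero (a : List Char) (s : List Char) (h : ∀ c ∈ a, c ≠ '/') :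
    a.foldl pvStepA (s, 0) = (s, 0) := by
  induction a with
  | nil => rfl
  | cons c t ih =>
    have hc : c ≠ '/' := h c List.mem_cons_self
    have ht : ∀ c ∈ t, c ≠ '/' := fun x hx => h x (List.mem_cons_of_mem _ hx)
    simp only [List.foldl_cons, pvStepA, if_neg hc]
    simpa using ih ht

-- A's fold: after the second slash the collected string is frozen
theorem pvFoldA_ge2 (t : List Char) : ∀ (s : List Char) (cnt : Nat), 2 ≤ cnt →
    (t.foldl pvStepA (s, cnt)).1 = s := by
  induction t with
  | nil => intro s cnt _; rfl
  | cons c r ih =>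
    intro s cnt hcnt
    by_cases hc : c = '/'
    · simp only [List.foldl_cons, pvStepA, if_pos hc]
      rw [if_neg (by omega)]
      exact ih s (cnt + 1) (by omega)
    · simp only [List.foldl_cons, pvStepA, if_neg hc]
      rw [if_neg (by omega)]
      exact ih s cnt hcnt

-- A's fold: between the first and the second slash it collects the mapped characters
theorem pvFoldA_one (w : List Char) : ∀ (s : List Char),
    (w.foldl pvStepA (s, 1)).1 = s ++ (w.takeWhile (fun c => c != '/')).map pvF := by
  induction w with
  | nil => intro s; simp
  | cons c t ih =>
    intro s
    by_cases hc : c = '/'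
    · subst hc
      have h1 : pvStepA (s, 1) '/' = (s, 2) := by simp [pvStepA]
      rw [List.foldl_cons, h1, pvFoldA_ge2 t s 2 le_rfl]
      simp [List.takeWhile]
    · have hb : (c != '/') = true := by simp [hc]
      have h1 : pvStepA (s, 1) c = (s ++ [pvF c], 1) := by
        by_cases hd : c = '-' <;> simp [pvStepA, hc, pvF, hd]
      rw [List.foldl_cons, h1, ih]
      simp [hb]

-- range(len, -1, -1) as a reversed Nat range
theorem pvRange_down (n : Nat) :
    PySem.List.pyRange (n : Int) (-1) (-1) = ((List.range (n + 1)).reverse).map (fun (k : Nat) => (k : Int)) := by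
  rw [List.map_reverse]
  rw [PySem.List.pyRange_neg_one_eq_reverse]
  congr 1
  unfold PySem.List.pyRange
  rw [if_neg (by norm_num)]
  have hcount : (((n : Int) + 1 - 0 + 1 - 1) / 1).toNat = n + 1 := by
    simp
  simp only [show (-1 : Int) + 1 = 0 from rfl]
  rw [if_pos (by norm_num), if_pos (by positivity)]
  simp [List.map_eq_flatMap]

theorem pvGet_neg_one (s : List Char) (h : s ≠ []) :
    PySem.List.pyGet? s (-1) = s.getLast? := by
  have hn : 1 ≤ s.length := List.length_pos_iff.mpr h
  simp only [PySem.List.pyGet?, PySem.List.pyIdx?]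
  rw [if_neg (by norm_num), if_pos (by omega)]
  simp [List.getLast?_eq_getElem?]

theorem pvFlatRev (s : List Char) (h : s ≠ []) : ∀ (k : Nat), 1 ≤ k → k ≤ s.length + 1 →
    ((List.range k).reverse).flatMap (fun (j : Nat) => (PySem.List.pyGet? s ((j : Int) - 1)).toList)
      = (s.take (k - 1)).reverse ++ s.getLast?.toList := by
  intro k
  induction k with
  | zero => omega
  | succ k ih =>
    intro _ hk
    by_cases hk1 : k = 0
    · subst hk1
      have h0 : ((0 : Nat) : Int) - 1 = -1 := by norm_num
      simp [List.range_one, pvGet_neg_one s h]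
    · have h1k : 1 ≤ k := Nat.one_le_iff_ne_zero.mpr hk1
      have hkn : k ≤ s.length := by omega
      rw [List.range_succ, List.reverse_append, List.flatMap_append, ih h1k (by omega)]
      simp only [List.flatMap_cons, List.flatMap_nil, List.append_nil, List.reverse_cons,
        List.reverse_nil, List.nil_append]
      have hidx : ((k : Nat) : Int) - 1 = ((k - 1 : Nat) : Int) := by omega
      rw [hidx, PySem.List.pyGet?_natCast]
      have hlt : k - 1 < s.length := by omega
      rw [List.getElem?_eq_getElem hlt]
      have htake : s.take k = s.take (k - 1) ++ [s[k - 1]] := by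
        conv_lhs => rw [show k = (k - 1) + 1 by omega]
        rw [List.take_succ, List.getElem?_eq_getElem hlt]
        rfl
      rw [show k + 1 - 1 = k by omega, htake]
      simp only [List.reverse_append, List.reverse_cons, List.reverse_nil, List.nil_append,
        Option.toList_some, List.cons_append]

theorem pvReverse_eq (s : List Char) (h : s ≠ []) :
    pvReverse s = s.reverse ++ s.getLast?.toList := by
  unfold pvReverse
  rw [pvRange_down, PySem.List.foldl_append_eq_flatMap, List.nil_append]
  simp only [List.flatMap_map]
  rw [pvFlatRev s h (s.length + 1) (by omega) le_rfl]
  simp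

theorem pvRemoveExtra_eq (t : List Char) (h : 2 ≤ t.length) :
    pvRemoveExtraCharacter t = t.take (t.length - 2) := by
  unfold pvRemoveExtraCharacter
  have : ((t.length : Int) - 2) = ((t.length - 2 : Nat) : Int) := by omega
  rw [this, show (some (0 : Int)) = some ((0 : Nat) : Int) from rfl, PySem.List.slice_natCast]
  simp

-- ===== VERDICT (by name: the statement is the Claim_ definition above) =====
theorem getLinkTitle_spec : Claim_equal_getLinkTitle := by
  intro link _hdom hpre
  unfold Spec_getLinkTitle
  set cs := link.toList with hcs
  set r := cs.reverse with hr
  have hmemr : '/' ∈ r := by simpa [hr] using hpre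
  -- decompose r at its first '/'
  set a := r.takeWhile (fun c => c != '/') with hadef
  set d := r.dropWhile (fun c => c != '/') with hddef
  have hdne : d ≠ [] := by
    rw [hddef]
    intro hnil
    rw [List.dropWhile_eq_nil_iff] at hnil
    simpa using hnil _ hmemr
  obtain ⟨c, w, hd⟩ : ∃ c w, d = c :: w := by
    cases hdc : d with
    | nil => exact absurd hdc hdne
    | cons c w0 => exact ⟨c, w0, rfl⟩
  have hc : c = '/' := by
    have := List.head_dropWhile_not (fun c => c != '/') (l := r) (by rw [← hddef]; exact hdne)
    rw [show d.head hdne = c from by simp [hd]] at this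
    simpa using this
  subst hc
  have hsplit : r = a ++ '/' :: w := by
    rw [hadef, hddef] at *
    rw [← hd]
    exact (List.takeWhile_append_dropWhile).symm
  have ha : ∀ c ∈ a, c ≠ '/' := by
    intro c hc
    have := List.mem_takeWhile_imp hc
    simpa using this
  have hcsr : cs = w.reverse ++ '/' :: a.reverse := by
    have : cs = r.reverse := by rw [hr, List.reverse_reverse]
    rw [this, hsplit]
    simp
  set X := (w.takeWhile (fun c => c != '/')).map pvF with hX
  -- A-side
  have hA : getLinkTitle link = String.mk X.reverse := by
    unfold getLinkTitle
    rw [← hcs, ← hr, hsplit, List.foldl_append]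
    rw [pvFoldA_zero a [] ha]
    have hstep : pvStepA ([], 0) '/' = ([' '], 1) := by simp [pvStepA]
    rw [List.foldl_cons, hstep]
    have hstr : (w.foldl pvStepA ([' '], 1)).1 = ' ' :: X := by
      rw [pvFoldA_one w [' ']]; simp [hX]
    -- the fold's result, projected
    have hfold : (List.foldl pvStepA ([' '], 1) w) = ((List.foldl pvStepA ([' '], 1) w).1, (List.foldl pvStepA ([' '], 1) w).2) := rfl
    rw [show (List.foldl pvStepA ([' '], 1) w).1 = ' ' :: X from hstr] at hfold
    simp only [hstr]
    rw [pvReverse_eq (' ' :: X) (by simp)]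
    obtain ⟨c0, hc0⟩ : ∃ c0, (' ' :: X).getLast? = some c0 :=
      Option.isSome_iff_exists.mp (by simp [List.getLast?_isSome])
    rw [hc0]
    simp only [Option.toList_some]
    have hlen : 2 ≤ ((' ' :: X).reverse ++ [c0]).length := by simp
    rw [pvRemoveExtra_eq _ hlen]
    have : ((' ' :: X).reverse ++ [c0]).length - 2 = X.length := by simp
    rw [this]
    congr 1
    have : (' ' :: X).reverse ++ [c0] = X.reverse ++ ([' '] ++ [c0]) := by simp
    rw [this]
    have hxx : X.length = X.reverse.length := List.length_reverse.symm
    rw [hxx, List.take_left]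
  -- B-side
  have hB : getLinkTitle_alt link = String.mk X.reverse := by
    show (match PySem.List.pyGet? (PySem.Chars.splitOn link.toList ['/']) (-2) with
      | some p => String.mk (PySem.Chars.replace p ['-'] [' '])
      | none => "") = String.mk X.reverse
    rw [← hcs, pvSplitOn_eq, hcsr, pvSplit_append, pvSplit_no_slash a.reverse []
      (by intro hm; exact ha '/' (List.mem_reverse.mp hm) rfl)]
    set M := pvSplit [] w.reverse with hM
    have hMne : M ≠ [] := pvSplit_ne_nil _ _
    have hMlen : 1 ≤ M.length := List.length_pos_iff.mpr hMne
    have hparts : (M ++ [[] ++ a.reverse]).length = M.length + 1 := by simp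
    have hget : PySem.List.pyGet? (M ++ [[] ++ a.reverse]) (-2) = M.getLast? := by
      simp only [PySem.List.pyGet?, PySem.List.pyIdx?, hparts]
      rw [if_neg (by norm_num), if_pos (by push_cast; omega)]
      have h2 : ((2 : Int)).toNat = 2 := rfl
      simp only [Option.bind_some, show (-(-2 : Int)).toNat = 2 from rfl]
      have hidx : M.length + 1 - 2 = M.length - 1 := by omega
      rw [hidx, List.getElem?_append_left (by omega), List.getLast?_eq_getElem?]
    rw [hget, pvSplit_getLast? w.reverse [] (by simp)]
    simp only [List.nil_append, List.reverse_reverse]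
    rw [pvReplace_eq]
    congr 1
    rw [hX, List.map_reverse]
  rw [hA, hB]
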